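-- pv_equiv track=rewrite | github.com/notjwp/The-Sentinel | sentinel/tests/fixtures/complex_function.py | deep_audit
-- ===== SOURCE A (Python) =====
-- def deep_audit(matrix: list[list[int]]) -> int:
--     score = 0
--     for row in matrix:
--         for value in row:
--             if value > 0:
--                 if value % 2 == 0:
--                     if value > 10:
--                         if value > 100:
--                             if value > 1000:
--                                 score += 5
--                             else:
--                                 score += 4
--                         else:
--                             if value > 50:
--                                 score += 3
--                             else:
--                                 score += 2
--                     else:
--                         score += 1
--                 else:
--                     if value > 10:
--                         score += 1
--                         if value > 100:
--                             if value > 1000: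
--                                 score += 2
--                             else:
--                                 score += 1
--                         else:
--                             if value > 50:
--                                 score += 1
--             else:
--                 if value == 0:
--                     score += 0
--                 if value < -10:
--                     if value < -100:
--                         score -= 1
--     return score
-- ===== SOURCE B (Python) =====
-- def deep_audit(matrix: list[list[int]]) -> int:
--     score = 0
--     for row in matrix:
--         for value in row:
--             if value > 0:
--                 thresholds = (0, 10, 50, 100, 1000) if value % 2 == 0 else (10, 50, 1000)
--                 score += sum(1 for t in thresholds if value > t)
--             elif value < -100:
--                 score -= 1
--     return score
-- ===== Notes on version B (the rewrite author's own statement) =====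
-- stated objective: simpler
-- what changed: Replaces the 8-deep nested branch tree with per-cell threshold counting: for positive values the score is the number of parity-dependent thresholds the value exceeds, and negative values below -100 subtract one.
import Mathlib
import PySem

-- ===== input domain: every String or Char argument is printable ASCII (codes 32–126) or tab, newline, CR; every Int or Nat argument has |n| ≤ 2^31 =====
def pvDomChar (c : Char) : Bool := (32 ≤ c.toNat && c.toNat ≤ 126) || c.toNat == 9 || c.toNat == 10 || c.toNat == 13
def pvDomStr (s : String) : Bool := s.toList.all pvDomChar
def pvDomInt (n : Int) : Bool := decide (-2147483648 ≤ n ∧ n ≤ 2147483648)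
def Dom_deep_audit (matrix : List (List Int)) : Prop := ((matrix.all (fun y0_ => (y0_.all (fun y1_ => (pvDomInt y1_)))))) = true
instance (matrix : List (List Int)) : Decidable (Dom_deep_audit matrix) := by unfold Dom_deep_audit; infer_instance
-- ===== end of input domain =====

-- B replaces A's 8-deep nested branch tree with per-cell threshold counting (objective: simpler).

-- ===== PORT A =====
-- step for one cell, transliterating A's nested if-tree
def deepAuditStep (score : Int) (value : Int) : Int :=
  if value > 0 then
    if value % 2 == 0 then
      if value > 10 then
        if value > 100 then
          if value > 1000 then score + 5 else score + 4
        else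
          if value > 50 then score + 3 else score + 2
      else score + 1
    else
      if value > 10 then
        let score := score + 1
        if value > 100 then
          if value > 1000 then score + 2 else score + 1
        else
          if value > 50 then score + 1 else score
      else score
  else
    let score := if value == 0 then score + 0 else score
    if value < -10 then
      if value < -100 then score - 1 else score
    else score

def deep_audit (matrix : List (List Int)) : Int :=
  matrix.foldl (fun score row => row.foldl deepAuditStep score) 0

-- ===== PORT B =====
def deepAuditCell (value : Int) : Int :=
  if value > 0 then
    let thresholds : List Int := if value % 2 == 0 then [0, 10, 50, 100, 1000] else [10, 50, 1000]
    ((thresholds.filter (fun t => value > t)).length : Int)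
  else if value < -100 then -1 else 0

def deep_audit_alt (matrix : List (List Int)) : Int :=
  matrix.foldl (fun score row => row.foldl (fun s v => s + deepAuditCell v) score) 0

-- ===== PRECONDITION & SPEC =====
def Spec_deep_audit (matrix : List (List Int)) (out : Int) : Prop := out = deep_audit_alt matrix
instance (matrix : List (List Int)) (out : Int) : Decidable (Spec_deep_audit matrix out) := by unfold Spec_deep_audit; infer_instance

-- ===== CLAIM (what is proved, stated in full; the proofs are below) =====
def Claim_equal_deep_audit : Prop := ∀ (matrix : List (List Int)), Dom_deep_audit matrix → Spec_deep_audit matrix (deep_audit matrix)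

-- ===== LEMMAS AND PROOFS =====
theorem deepAuditStep_eq (s v : Int) : deepAuditStep s v = s + deepAuditCell v := by
  unfold deepAuditStep deepAuditCell
  by_cases hp : v > 0
  · by_cases he : v % 2 = 0
    · have hb : (v % 2 == 0) = true := by simp [he]
      simp only [hp, if_pos, hb, if_true, List.filter_cons, List.filter_nil,
        decide_eq_true_eq]
      split_ifs <;> simp <;> omega
    · have hb : (v % 2 == 0) = false := by simp [he]
      simp only [hp, if_pos, hb, Bool.false_eq_true, if_false, List.filter_cons,
        List.filter_nil, decide_eq_true_eq]
      split_ifs <;> simp <;> omega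
  · simp only [hp, if_false]
    split_ifs <;> simp_all <;> omega

theorem row_foldl_eq (row : List Int) (s : Int) :
    row.foldl deepAuditStep s = row.foldl (fun s v => s + deepAuditCell v) s := by
  induction row generalizing s with
  | nil => rfl
  | cons v t ih => simp [List.foldl, deepAuditStep_eq, ih]

-- ===== VERDICT (by name: the statement is the Claim_ definition above) =====
theorem deep_audit_spec : Claim_equal_deep_audit := by
  intro matrix _
  unfold Spec_deep_audit deep_audit deep_audit_alt
  induction matrix using List.reverseRecOn with
  | nil => rfl
  | append_singleton t r ih => simp only [List.foldl_append, List.foldl, row_foldl_eq]
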